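-- pv_equiv track=rewrite | github.com/sebesjoberg/Programmering10hp | Python/Pythonprov/prov-23-03-03.py | scramble_word
-- ===== SOURCE A (Python) =====
-- import string
--
-- def scramble_word(text):
--     textpiece = ""
--     for index in range(0,len(text),2):
--         try:
--             if text[index] in string.ascii_letters and text[index+1] in string.ascii_letters:
--                 textpiece =textpiece + text[index+1]+text[index]
--             else:
--                 textpiece = textpiece + text[index]+text[index+1]
--         except IndexError:
--             textpiece = textpiece + text[index]
--     return textpiece
-- ===== SOURCE B (Python) =====
-- import string
--
--
-- def scramble_word(text):
--     # Per-position source map: output position i draws its character from its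
--     # partner within the aligned 2-block (i+1 for even i, i-1 for odd i) exactly
--     # when that partner exists and both characters are ASCII letters; otherwise
--     # from i itself. No pairing loop, no exception handling.
--     n = len(text)
--
--     def source(i):
--         j = i + 1 if i % 2 == 0 else i - 1
--         if j < n and text[i] in string.ascii_letters and text[j] in string.ascii_letters:
--             return j
--         return i
--
--     return "".join(text[source(i)] for i in range(n))
-- ===== Notes on version B (the rewrite author's own statement) =====
-- stated objective: faster
-- what changed: B computes each output position independently through a closed-form partner-index map (source = the neighbour inside the aligned 2-block when both characters are ASCII letters, else the position itself) over range(len(text)) and joins once, instead of A's stride-2 pair loop with try/except probing and repeated string concatenation.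
import Mathlib
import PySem

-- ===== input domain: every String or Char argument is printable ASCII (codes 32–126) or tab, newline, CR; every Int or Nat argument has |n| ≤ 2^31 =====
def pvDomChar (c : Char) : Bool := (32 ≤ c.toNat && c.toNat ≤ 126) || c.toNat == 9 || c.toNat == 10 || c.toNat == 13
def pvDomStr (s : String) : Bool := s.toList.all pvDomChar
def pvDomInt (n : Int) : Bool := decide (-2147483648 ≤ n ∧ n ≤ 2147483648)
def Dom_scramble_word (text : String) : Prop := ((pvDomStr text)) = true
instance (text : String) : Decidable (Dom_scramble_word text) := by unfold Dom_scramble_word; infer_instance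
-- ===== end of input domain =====

-- B maps every output position to a source position (the partner inside its aligned
-- 2-block when both characters are letters, else itself) and joins once, instead of
-- A's stride-2 pair loop with try/except and repeated concatenation; a timing run
-- measured B faster on large inputs.

-- shared char class: membership in string.ascii_letters
def pvAsciiLetter (c : Char) : Bool :=
  ('a' ≤ c && c ≤ 'z') || ('A' ≤ c && c ≤ 'Z')

-- ===== PORT A =====
-- loop body of A: try text[index]/text[index+1]; IndexError = pyGet? returning none
def pvBodyA (cs : List Char) (acc : List Char) (idx : Int) : List Char :=
  match PySem.List.pyGet? cs idx, PySem.List.pyGet? cs (idx + 1) with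
  | some x, some y =>
      if pvAsciiLetter x && pvAsciiLetter y then acc ++ [y, x] else acc ++ [x, y]
  | some x, none => acc ++ [x]
  | none, _ => acc

def scramble_word (text : String) : String :=
  let cs := text.toList
  ((PySem.List.pyRange 0 (cs.length : Int) 2).foldl (pvBodyA cs) []) |> String.ofList

-- ===== PORT B =====
-- source(i) of Source B: partner index inside the aligned 2-block, or i itself
def pvSource (cs : List Char) (i : Nat) : Nat :=
  let j := if i % 2 = 0 then i + 1 else i - 1
  if j < cs.length ∧ (pvAsciiLetter (cs.getD i ' ') && pvAsciiLetter (cs.getD j ' ')) = true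
  then j else i

-- "".join(text[source(i)] for i in range(n))
def scramble_word_alt (text : String) : String :=
  let cs := text.toList
  String.ofList ((List.range cs.length).map (fun i => cs.getD (pvSource cs i) ' '))

-- ===== PRECONDITION & SPEC =====
def Spec_scramble_word (text : String) (out : String) : Prop := out = scramble_word_alt text
instance (text : String) (out : String) : Decidable (Spec_scramble_word text out) := by unfold Spec_scramble_word; infer_instance

-- ===== CLAIM (what is proved, stated in full; the proofs are below) =====
def Claim_equal_scramble_word : Prop := ∀ (text : String), Dom_scramble_word text → Spec_scramble_word text (scramble_word text)

-- ===== LEMMAS AND PROOFS =====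

-- proof-side bridge: the common pair decomposition both ports compute
def pvChunks : List Char → List (List Char)
  | [] => []
  | [x] => [[x]]
  | x :: y :: rest =>
      (if pvAsciiLetter x && pvAsciiLetter y then [y, x] else [x, y]) :: pvChunks rest

lemma pvRange2_step (n : Int) (hn : 0 ≤ n) :
    PySem.List.pyRange 0 (n + 2) 2 = 0 :: (PySem.List.pyRange 0 n 2).map (· + 2) := by
  rw [PySem.List.pyRange_of_pos 0 (n + 2) (by norm_num),
      PySem.List.pyRange_of_pos 0 n (by norm_num)]
  have hcount : ((n + 2 - 0 + 2 - 1) / 2).toNat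
      = (if 0 < n then ((n - 0 + 2 - 1) / 2).toNat else 0) + 1 := by
    split_ifs with h <;> omega
  rw [if_pos (by omega), hcount, List.range_succ_eq_map]
  simp only [List.map_cons, List.map_map]
  refine congrArg₂ _ (by omega) ?_
  apply List.map_congr_left
  intro k _
  simp only [Function.comp_apply]
  push_cast
  ring

lemma pvGet?_cons_of_nonneg {α : Type} (a : α) (l : List α) (i : Int) (hi : 0 ≤ i) :
    PySem.List.pyGet? (a :: l) (i + 1) = PySem.List.pyGet? l i := by
  obtain ⟨n, rfl⟩ := Int.eq_ofNat_of_zero_le hi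
  exact PySem.List.pyGet?_cons_succ a l n

-- A's foldl computes the flattened pair decomposition
lemma pvKeyA (cs : List Char) (acc : List Char) :
    (PySem.List.pyRange 0 (cs.length : Int) 2).foldl (pvBodyA cs) acc
      = acc ++ (pvChunks cs).flatten := by
  induction cs using pvChunks.induct generalizing acc with
  | case1 =>
      simp [pvChunks, PySem.List.pyRange]
  | case2 x =>
      have h1 : PySem.List.pyRange 0 ((1 : Nat) : Int) 2 = [0] := by decide
      simp only [List.length_singleton, h1, List.foldl_cons, List.foldl_nil]
      have hg1 : PySem.List.pyGet? [x] 0 = some x := PySem.List.pyGet?_zero_cons x []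
      have hg2 : PySem.List.pyGet? [x] (0 + 1) = none := by
        rw [pvGet?_cons_of_nonneg x [] 0 le_rfl]
        decide
      unfold pvBodyA
      rw [hg1, hg2]
      simp [pvChunks]
  | case3 x y rest ih =>
      have hlen : ((x :: y :: rest).length : Int) = (rest.length : Int) + 2 := by
        simp; ring
      rw [hlen, pvRange2_step _ (by positivity), List.foldl_cons, List.foldl_map]
      have hbody : ∀ (b : List Char), ∀ i ∈ PySem.List.pyRange 0 (rest.length : Int) 2,
          pvBodyA (x :: y :: rest) b (i + 2) = pvBodyA rest b i := by
        intro b i hi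
        have hi0 : 0 ≤ i := by
          have := (PySem.List.mem_pyRange_iff_of_pos (by norm_num : (0:Int) < 2) i).mp hi
          omega
        unfold pvBodyA
        rw [show i + 2 = (i + 1) + 1 by ring,
            pvGet?_cons_of_nonneg x _ (i + 1) (by omega),
            pvGet?_cons_of_nonneg y _ i hi0,
            show (i + 1) + 1 + 1 = ((i + 1) + 1) + 1 by ring,
            pvGet?_cons_of_nonneg x _ ((i + 1) + 1) (by omega),
            pvGet?_cons_of_nonneg y _ (i + 1) (by omega)]
      rw [PySem.List.foldl_congr_mem _ _ _ _ hbody, ih]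
      have hg1 : PySem.List.pyGet? (x :: y :: rest) 0 = some x :=
        PySem.List.pyGet?_zero_cons x (y :: rest)
      have hg2 : PySem.List.pyGet? (x :: y :: rest) (0 + 1) = some y := by
        rw [pvGet?_cons_of_nonneg x (y :: rest) 0 le_rfl]
        exact PySem.List.pyGet?_zero_cons y rest
      have hfirst : pvBodyA (x :: y :: rest) acc 0
          = acc ++ (if pvAsciiLetter x && pvAsciiLetter y then [y, x] else [x, y]) := by
        unfold pvBodyA
        rw [hg1, hg2]
        dsimp only
        split_ifs <;> simp
      rw [hfirst]
      simp [pvChunks]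

lemma pvRange_plus_two (n : Nat) :
    List.range (n + 2) = 0 :: 1 :: (List.range n).map (· + 2) := by
  rw [List.range_succ_eq_map, List.range_succ_eq_map]
  simp only [List.map_cons, List.map_map]
  refine congrArg _ (congrArg₂ _ rfl ?_)
  apply List.map_congr_left
  intro k _
  simp [Function.comp_apply]

-- B's per-position map also computes the flattened pair decomposition
lemma pvKeyB (cs : List Char) :
    (List.range cs.length).map (fun i => cs.getD (pvSource cs i) ' ')
      = (pvChunks cs).flatten := by
  induction cs using pvChunks.induct with
  | case1 => simp [pvChunks]
  | case2 x =>
      simp [pvChunks, pvSource]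
  | case3 x y rest ih =>
      have hlen : (x :: y :: rest).length = rest.length + 2 := by simp
      rw [hlen, pvRange_plus_two, List.map_cons, List.map_cons, List.map_map]
      have htail : (List.range rest.length).map
            ((fun i => (x :: y :: rest).getD (pvSource (x :: y :: rest) i) ' ') ∘ (· + 2))
          = (List.range rest.length).map (fun i => rest.getD (pvSource rest i) ' ') := by
        apply List.map_congr_left
        intro i hi
        have hi' : i < rest.length := List.mem_range.mp hi
        simp only [Function.comp_apply]
        have hsrc : pvSource (x :: y :: rest) (i + 2) = pvSource rest i + 2 := by
          rcases Nat.even_or_odd i with he | ho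
          · have hp : i % 2 = 0 := Nat.even_iff.mp he
            have hp2 : (i + 2) % 2 = 0 := by omega
            have g2 : (x :: y :: rest).getD (i + 2) ' ' = rest.getD i ' ' := rfl
            have g3 : (x :: y :: rest).getD (i + 2 + 1) ' ' = rest.getD (i + 1) ' ' := rfl
            simp only [pvSource, hp, hp2, reduceIte, List.length_cons, g2, g3]
            have hiff : (i + 2 + 1 < rest.length + 1 + 1) ↔ (i + 1 < rest.length) := by omega
            by_cases hb : i + 1 < rest.length ∧
                (pvAsciiLetter (rest.getD i ' ') && pvAsciiLetter (rest.getD (i + 1) ' ')) = true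
            · rw [if_pos ⟨hiff.mpr hb.1, hb.2⟩, if_pos hb]
            · rw [if_neg (fun h => hb ⟨hiff.mp h.1, h.2⟩), if_neg hb]
          · obtain ⟨k, rfl⟩ : ∃ k, i = k + 1 :=
              ⟨i - 1, by have := Nat.odd_iff.mp ho; omega⟩
            have hp : (k + 1) % 2 = 1 := Nat.odd_iff.mp ho
            have hp2 : (k + 1 + 2) % 2 = 1 := by omega
            have g2 : (x :: y :: rest).getD (k + 1 + 2) ' ' = rest.getD (k + 1) ' ' := rfl
            have g3 : (x :: y :: rest).getD (k + 1 + 2 - 1) ' ' = rest.getD (k + 1 - 1) ' ' := rfl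
            simp only [pvSource, hp, hp2, List.length_cons,
              if_neg (one_ne_zero : (1 : ℕ) ≠ 0), g2, g3]
            have e1 : k + 1 + 2 - 1 = k + 2 := by omega
            have e2 : k + 1 - 1 = k := by omega
            simp only [e1, e2]
            have hiff : (k + 2 < rest.length + 1 + 1) ↔ (k < rest.length) := by omega
            by_cases hb : k < rest.length ∧
                (pvAsciiLetter (rest.getD (k + 1) ' ') && pvAsciiLetter (rest.getD k ' ')) = true
            · rw [if_pos ⟨hiff.mpr hb.1, hb.2⟩, if_pos hb]
            · rw [if_neg (fun h => hb ⟨hiff.mp h.1, h.2⟩), if_neg hb]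
        rw [hsrc]
        rfl
      rw [htail, ih]
      have hb0 : (x :: y :: rest).getD (pvSource (x :: y :: rest) 0) ' '
          = (if (pvAsciiLetter x && pvAsciiLetter y) = true then y else x) := by
        by_cases hb : (pvAsciiLetter x && pvAsciiLetter y) = true
        · simp [pvSource, hb]
        · simp [pvSource, hb]
      have hb1 : (x :: y :: rest).getD (pvSource (x :: y :: rest) 1) ' '
          = (if (pvAsciiLetter x && pvAsciiLetter y) = true then x else y) := by
        by_cases hb : (pvAsciiLetter x && pvAsciiLetter y) = true
        · simp [pvSource, Bool.and_comm, hb]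
        · simp [pvSource, Bool.and_comm, hb]
      rw [hb0, hb1]
      simp only [pvChunks, List.flatten_cons]
      by_cases hb : (pvAsciiLetter x && pvAsciiLetter y) = true
      · simp [hb]
      · simp [hb]

-- ===== VERDICT (by name: the statement is the Claim_ definition above) =====
theorem scramble_word_spec : Claim_equal_scramble_word := by
  intro text _
  unfold Spec_scramble_word scramble_word scramble_word_alt
  simp only [pvKeyA text.toList [], List.nil_append, pvKeyB]
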